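-- pv_equiv track=rewrite | github.com/siamanna/ax25_encoder | ax25decoder.py | descramble
-- ===== SOURCE A (Python) =====
-- def descramble(bits):
--     sr = [0]*17  # Shift register initialized with zeros
--     descrambled_bits = []
--     for bit in bits:
--         # Scrambler polynomial: x^17 + x^12 + 1
--         feedback = sr[11] ^ sr[16]
--         descrambled_bit = bit ^ feedback
--         descrambled_bits.append(descrambled_bit)
--         # Shift register
--         sr = [descrambled_bit] + sr[:-1]
--     return descrambled_bits
-- ===== SOURCE B (Python) =====
-- def descramble(bits):
--     # Forward-substitution / scatter: copy the input, then push each finalized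
--     # output bit forward into the two positions it feeds (i+12 and i+17).
--     out = list(bits)
--     n = len(out)
--     for i in range(n):
--         if i + 12 < n:
--             out[i + 12] ^= out[i]
--         if i + 17 < n:
--             out[i + 17] ^= out[i]
--     return out
-- ===== Notes on version B (the rewrite author's own statement) =====
-- stated objective: alternative
-- what changed: B replaces A's gather-style pass (a 17-slot shift register rebuilt per bit to compute a feedback term) with scatter-style forward substitution: it copies the input once and, walking left to right, XORs each finalized output element forward into the two positions (i+12, i+17) it feeds; B maintains no register and computes no feedback term.
import Mathlib
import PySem

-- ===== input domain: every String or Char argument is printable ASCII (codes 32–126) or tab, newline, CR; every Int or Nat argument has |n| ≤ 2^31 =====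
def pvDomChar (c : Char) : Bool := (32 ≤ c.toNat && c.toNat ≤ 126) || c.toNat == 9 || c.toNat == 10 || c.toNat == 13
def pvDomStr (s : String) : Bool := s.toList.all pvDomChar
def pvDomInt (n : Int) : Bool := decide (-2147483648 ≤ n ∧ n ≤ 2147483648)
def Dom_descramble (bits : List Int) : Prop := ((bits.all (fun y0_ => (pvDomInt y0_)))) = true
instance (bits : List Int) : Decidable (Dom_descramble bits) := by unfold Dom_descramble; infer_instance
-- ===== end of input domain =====

-- B replaces A's gather pass (17-slot shift register computing a feedback term per bit)
-- with scatter-style forward substitution on a copy of the input: each finalized element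
-- is XORed forward into positions i+12 and i+17. Objective: alternative (same O(n) cost).

-- ===== PORT A =====
-- A: state = (shift register sr of length 17, accumulated output); indices 11 and 16 are
-- always in range (|sr| = 17), so getD's default is never taken.
def descramble (bits : List Int) : List Int :=
  (bits.foldl (fun st bit =>
    let sr := st.1
    let feedback := PySem.Int.bxor (sr.getD 11 0) (sr.getD 16 0)
    let descrambled_bit := PySem.Int.bxor bit feedback
    (descrambled_bit :: sr.take 16, st.2 ++ [descrambled_bit]))   -- sr[:-1] on a 17-list = take 16
    (List.replicate 17 0, [])).2

-- ===== PORT B =====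
-- B: out = copy of bits; for i in range(n): out[i+12] ^= out[i]; out[i+17] ^= out[i]
-- (each guarded by the bound check); indices written are always in range, so set is exact.
def descramble_alt (bits : List Int) : List Int :=
  let n := bits.length
  (List.range n).foldl (fun out i =>
    let out := if i + 12 < n then out.set (i + 12) (PySem.Int.bxor (out.getD (i + 12) 0) (out.getD i 0)) else out
    if i + 17 < n then out.set (i + 17) (PySem.Int.bxor (out.getD (i + 17) 0) (out.getD i 0)) else out)
    bits

-- ===== PRECONDITION & SPEC =====
def Spec_descramble (bits : List Int) (out : List Int) : Prop := out = descramble_alt bits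
instance (bits : List Int) (out : List Int) : Decidable (Spec_descramble bits out) := by unfold Spec_descramble; infer_instance

-- ===== CLAIM (what is proved, stated in full; the proofs are below) =====
def Claim_equal_descramble : Prop := ∀ (bits : List Int), Dom_descramble bits → Spec_descramble bits (descramble bits)

-- ===== LEMMAS AND PROOFS =====

-- xor algebra for PySem.Int.bxor (assoc via constructor cases; comm/zero are in PySem)
lemma pv_bxor_ofNat_ofNat (m n : Nat) :
    PySem.Int.bxor (Int.ofNat m) (Int.ofNat n) = Int.ofNat (m ^^^ n) := by
  simp [PySem.Int.bxor]

lemma pv_bxor_ofNat_negSucc (m n : Nat) :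
    PySem.Int.bxor (Int.ofNat m) (Int.negSucc n) = Int.negSucc (m ^^^ n) := by
  simp only [PySem.Int.bxor, Int.negSucc_eq, Int.ofNat_eq_natCast, neg_neg, add_sub_cancel_right,
    Int.toNat_natCast]
  rw [if_pos (by omega), if_neg (by omega)]
  omega

lemma pv_bxor_negSucc_ofNat (m n : Nat) :
    PySem.Int.bxor (Int.negSucc m) (Int.ofNat n) = Int.negSucc (m ^^^ n) := by
  simp only [PySem.Int.bxor, Int.negSucc_eq, Int.ofNat_eq_natCast, neg_neg, add_sub_cancel_right,
    Int.toNat_natCast]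
  rw [if_neg (by omega), if_pos (by omega)]
  omega

lemma pv_bxor_negSucc_negSucc (m n : Nat) :
    PySem.Int.bxor (Int.negSucc m) (Int.negSucc n) = Int.ofNat (m ^^^ n) := by
  simp only [PySem.Int.bxor, Int.negSucc_eq, Int.ofNat_eq_natCast, neg_neg, add_sub_cancel_right,
    Int.toNat_natCast]
  rw [if_neg (by omega), if_neg (by omega)]

lemma pv_bxor_assoc (a b c : Int) :
    PySem.Int.bxor (PySem.Int.bxor a b) c = PySem.Int.bxor a (PySem.Int.bxor b c) := by
  rcases a with m | m <;> rcases b with n | n <;> rcases c with p | p <;>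
    simp only [pv_bxor_ofNat_ofNat, pv_bxor_ofNat_negSucc, pv_bxor_negSucc_ofNat,
      pv_bxor_negSucc_negSucc, Nat.xor_assoc]

-- the ideal result: pvF bits i = the i-th descrambled value (x^17 + x^12 + 1 recurrence)
def pvF (bits : List Int) (i : Nat) : Int :=
  PySem.Int.bxor (bits.getD i 0)
    (PySem.Int.bxor (if h : 12 ≤ i then pvF bits (i - 12) else 0)
                    (if h : 17 ≤ i then pvF bits (i - 17) else 0))
termination_by i
decreasing_by all_goals omega

lemma pv_map_getD (bits : List Int) (k j : Nat) (hj : j < k) :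
    ((List.range k).map (pvF bits)).getD j 0 = pvF bits j := by
  rw [List.getD_eq_getElem?_getD, List.getElem?_map, List.getElem?_range hj]
  rfl

-- ---------- A-side: register fold = map pvF ----------

-- the register A maintains, expressed from the output produced so far: last 17 outputs,
-- newest first, zero-padded
def pvReg (out : List Int) : List Int := (out.reverse ++ List.replicate 17 0).take 17

lemma pvReg_getD (out : List Int) (j : Nat) (hj : j < 17) :
    (pvReg out).getD j 0 = if out.length ≥ j + 1 then out.getD (out.length - (j + 1)) 0 else 0 := by
  unfold pvReg
  rcases Nat.lt_or_ge j out.length with h | h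
  · rw [if_pos (by omega)]
    rw [List.getD_eq_getElem?_getD, List.getElem?_take_of_lt hj,
        List.getElem?_append_left (by simpa using h), List.getElem?_reverse h,
        List.getD_eq_getElem?_getD]
    congr 2
    omega
  · rw [if_neg (by omega)]
    rw [List.getD_eq_getElem?_getD, List.getElem?_take_of_lt hj,
        List.getElem?_append_right (by simpa using h),
        List.getElem?_replicate]
    split <;> rfl

lemma pvReg_step (out : List Int) (b : Int) :
    pvReg (out ++ [b]) = b :: (pvReg out).take 16 := by
  unfold pvReg
  rw [List.reverse_append]
  simp [List.take_take, List.take_succ_cons]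

lemma pvF_unfold (bits : List Int) (k : Nat) :
    pvF bits k =
      PySem.Int.bxor (bits.getD k 0)
        (PySem.Int.bxor (if 12 ≤ k then pvF bits (k - 12) else 0)
                        (if 17 ≤ k then pvF bits (k - 17) else 0)) := by
  rw [pvF]
  simp only [dite_eq_ite]

lemma pv_a_main (bits : List Int) : ∀ (l : List Int) (k : Nat), bits.drop k = l →
    (l.foldl (fun st bit =>
      let sr := st.1
      let feedback := PySem.Int.bxor (sr.getD 11 0) (sr.getD 16 0)
      let descrambled_bit := PySem.Int.bxor bit feedback
      (descrambled_bit :: sr.take 16, st.2 ++ [descrambled_bit]))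
      (pvReg ((List.range k).map (pvF bits)), (List.range k).map (pvF bits))).2
    = (List.range (k + l.length)).map (pvF bits) := by
  intro l
  induction l with
  | nil => intro k _; simp
  | cons b t ih =>
    intro k hk
    have hlen : k < bits.length := by
      have := congrArg List.length hk
      rw [List.length_drop] at this
      simp at this
      omega
    have hb : bits.getD k 0 = b := by
      have h0 : (bits.drop k)[0]? = bits[k]? := by simp
      rw [hk] at h0
      rw [List.getD_eq_getElem?_getD, ← h0]
      rfl
    have ht : bits.drop (k + 1) = t := by
      have : bits.drop (k + 1) = (bits.drop k).drop 1 := by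
        rw [List.drop_drop]
      rw [this, hk]
      rfl
    simp only [List.foldl_cons]
    set out := (List.range k).map (pvF bits) with hout
    have holen : out.length = k := by simp [hout]
    have h11 := pvReg_getD out 11 (by omega)
    have h16 := pvReg_getD out 16 (by omega)
    have hfb12 : (if out.length ≥ 11 + 1 then out.getD (out.length - (11 + 1)) 0 else 0)
        = (if 12 ≤ k then pvF bits (k - 12) else 0) := by
      rw [holen]
      split_ifs with h1
      · rw [hout, pv_map_getD bits k (k - (11 + 1)) (by omega)]
      · rfl
    have hfb17 : (if out.length ≥ 16 + 1 then out.getD (out.length - (16 + 1)) 0 else 0)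
        = (if 17 ≤ k then pvF bits (k - 17) else 0) := by
      rw [holen]
      split_ifs with h1
      · rw [hout, pv_map_getD bits k (k - (16 + 1)) (by omega)]
      · rfl
    have hfb : PySem.Int.bxor b (PySem.Int.bxor ((pvReg out).getD 11 0) ((pvReg out).getD 16 0))
        = pvF bits k := by
      rw [h11, h16, hfb12, hfb17, ← hb, pvF_unfold bits k]
    have hnext : out ++ [pvF bits k] = (List.range (k + 1)).map (pvF bits) := by
      rw [hout, List.range_succ, List.map_append]
      rfl
    have harr : k + (b :: t).length = (k + 1) + t.length := by
      simp
      omega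
    rw [harr]
    rw [hfb, ← pvReg_step out (pvF bits k), hnext]
    exact ih (k + 1) ht

-- ---------- B-side: scatter fold = map pvF ----------

-- invariant value of slot j after the first k indices have been pushed
def pvSlot (bits : List Int) (k j : Nat) : Int :=
  PySem.Int.bxor (PySem.Int.bxor (bits.getD j 0)
      (if 12 ≤ j ∧ j < k + 12 then pvF bits (j - 12) else 0))
    (if 17 ≤ j ∧ j < k + 17 then pvF bits (j - 17) else 0)

lemma pvSlot_self (bits : List Int) (k : Nat) : pvSlot bits k k = pvF bits k := by
  unfold pvSlot
  rw [pvF_unfold bits k, ← pv_bxor_assoc]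
  have e1 : (if 12 ≤ k ∧ k < k + 12 then pvF bits (k - 12) else 0)
      = (if 12 ≤ k then pvF bits (k - 12) else 0) := by
    split_ifs <;> first | rfl | omega
  have e2 : (if 17 ≤ k ∧ k < k + 17 then pvF bits (k - 17) else 0)
      = (if 17 ≤ k then pvF bits (k - 17) else 0) := by
    split_ifs <;> first | rfl | omega
  rw [e1, e2]

-- helper getD-of-set facts
lemma pv_getD_set_ne (l : List Int) (i j : Nat) (v : Int) (h : i ≠ j) :
    (l.set i v).getD j 0 = l.getD j 0 := by
  simp [List.getD_eq_getElem?_getD, List.getElem?_set_ne h]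

lemma pv_getD_set_self (l : List Int) (i : Nat) (v : Int) (h : i < l.length) :
    (l.set i v).getD i 0 = v := by
  simp [List.getD_eq_getElem?_getD, h]

lemma pvSlot_succ_ne (bits : List Int) (k j : Nat) (h12 : j ≠ k + 12) (h17 : j ≠ k + 17) :
    pvSlot bits (k + 1) j = pvSlot bits k j := by
  unfold pvSlot
  have e1 : (if 12 ≤ j ∧ j < k + 1 + 12 then pvF bits (j - 12) else 0)
      = (if 12 ≤ j ∧ j < k + 12 then pvF bits (j - 12) else 0) := by
    split_ifs <;> first | rfl | omega
  have e2 : (if 17 ≤ j ∧ j < k + 1 + 17 then pvF bits (j - 17) else 0)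
      = (if 17 ≤ j ∧ j < k + 17 then pvF bits (j - 17) else 0) := by
    split_ifs <;> first | rfl | omega
  rw [e1, e2]

lemma pv_xor_rot (x c v : Int) :
    PySem.Int.bxor (PySem.Int.bxor (PySem.Int.bxor x 0) c) v
      = PySem.Int.bxor (PySem.Int.bxor x v) c := by
  rw [PySem.Int.bxor_zero, pv_bxor_assoc, PySem.Int.bxor_comm c v, ← pv_bxor_assoc]

-- the body of B's loop, with the captured n = bits.length written out
def pvStep (bits : List Int) (out : List Int) (i : Nat) : List Int :=
  let out := if i + 12 < bits.length then out.set (i + 12) (PySem.Int.bxor (out.getD (i + 12) 0) (out.getD i 0)) else out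
  if i + 17 < bits.length then out.set (i + 17) (PySem.Int.bxor (out.getD (i + 17) 0) (out.getD i 0)) else out

lemma pvSlot_step12 (bits : List Int) (k : Nat) :
    PySem.Int.bxor (pvSlot bits k (k + 12)) (pvF bits k) = pvSlot bits (k + 1) (k + 12) := by
  unfold pvSlot
  have e0 : (if 12 ≤ k + 12 ∧ k + 12 < k + 12 then pvF bits (k + 12 - 12) else 0) = 0 := by
    rw [if_neg (by omega)]
  have e1 : (if 12 ≤ k + 12 ∧ k + 12 < k + 1 + 12 then pvF bits (k + 12 - 12) else 0)
      = pvF bits k := by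
    rw [if_pos (by omega)]
    simp
  have e2 : (if 17 ≤ k + 12 ∧ k + 12 < k + 1 + 17 then pvF bits (k + 12 - 17) else 0)
      = (if 17 ≤ k + 12 ∧ k + 12 < k + 17 then pvF bits (k + 12 - 17) else 0) := by
    split_ifs <;> first | rfl | omega
  rw [e0, e1, e2]
  exact pv_xor_rot _ _ _

lemma pvSlot_step17 (bits : List Int) (k : Nat) :
    PySem.Int.bxor (pvSlot bits k (k + 17)) (pvF bits k) = pvSlot bits (k + 1) (k + 17) := by
  unfold pvSlot
  have e0 : (if 17 ≤ k + 17 ∧ k + 17 < k + 17 then pvF bits (k + 17 - 17) else 0) = 0 := by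
    rw [if_neg (by omega)]
  have e1 : (if 17 ≤ k + 17 ∧ k + 17 < k + 1 + 17 then pvF bits (k + 17 - 17) else 0)
      = pvF bits k := by
    rw [if_pos (by omega)]
    simp
  have e2 : (if 12 ≤ k + 17 ∧ k + 17 < k + 12 then pvF bits (k + 17 - 12) else 0) = 0 := by
    rw [if_neg (by omega)]
  have e3 : (if 12 ≤ k + 17 ∧ k + 17 < k + 1 + 12 then pvF bits (k + 17 - 12) else 0) = 0 := by
    rw [if_neg (by omega)]
  rw [e0, e1, e2, e3]
  simp

lemma pv_b_step (bits out : List Int) (k : Nat) (hlen : out.length = bits.length)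
    (hk : k < bits.length) (hinv : ∀ j, j < bits.length → out.getD j 0 = pvSlot bits k j) :
    (pvStep bits out k).length = bits.length ∧
      (∀ j, j < bits.length → (pvStep bits out k).getD j 0 = pvSlot bits (k + 1) j) := by
  have hv : out.getD k 0 = pvF bits k := by rw [hinv k hk, pvSlot_self]
  unfold pvStep
  by_cases h12 : k + 12 < bits.length <;> by_cases h17 : k + 17 < bits.length
  · rw [if_pos h12, if_pos h17]
    have ho1k : ((out.set (k + 12) (PySem.Int.bxor (out.getD (k + 12) 0) (out.getD k 0))).getD k 0)
        = pvF bits k := by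
      rw [pv_getD_set_ne out (k + 12) k _ (by omega), hv]
    have ho117 : ((out.set (k + 12) (PySem.Int.bxor (out.getD (k + 12) 0) (out.getD k 0))).getD (k + 17) 0)
        = out.getD (k + 17) 0 := pv_getD_set_ne out (k + 12) (k + 17) _ (by omega)
    refine ⟨by simp [hlen], ?_⟩
    intro j hj
    rcases eq_or_ne j (k + 17) with rfl | hne17
    · rw [pv_getD_set_self _ (k + 17) _ (by simp only [List.length_set]; omega),
        ho117, ho1k, hinv (k + 17) hj, pvSlot_step17]
    · rcases eq_or_ne j (k + 12) with rfl | hne12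
      · rw [pv_getD_set_ne _ (k + 17) (k + 12) _ (by omega),
          pv_getD_set_self _ (k + 12) _ (by omega),
          hv, hinv (k + 12) hj, pvSlot_step12]
      · rw [pv_getD_set_ne _ (k + 17) j _ (by omega), pv_getD_set_ne _ (k + 12) j _ (by omega),
          hinv j hj, pvSlot_succ_ne bits k j hne12 hne17]
  · rw [if_pos h12, if_neg h17]
    refine ⟨by simp [hlen], ?_⟩
    intro j hj
    rcases eq_or_ne j (k + 12) with rfl | hne12
    · rw [pv_getD_set_self _ (k + 12) _ (by omega),
        hv, hinv (k + 12) hj, pvSlot_step12]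
    · rw [pv_getD_set_ne _ (k + 12) j _ (by omega), hinv j hj,
        pvSlot_succ_ne bits k j hne12 (by omega)]
  · omega
  · rw [if_neg h12, if_neg h17]
    refine ⟨hlen, ?_⟩
    intro j hj
    rw [hinv j hj, pvSlot_succ_ne bits k j (by omega) (by omega)]

lemma pv_b_inv (bits : List Int) : ∀ (m k : Nat) (out : List Int),
    bits.length - k = m → out.length = bits.length →
    (∀ j, j < bits.length → out.getD j 0 = pvSlot bits k j) →
    (List.range' k (bits.length - k)).foldl (pvStep bits) out
      = (List.range bits.length).map (pvF bits) := by
  intro m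
  induction m with
  | zero =>
    intro k out hm hlen hinv
    rw [hm, List.range'_zero, List.foldl_nil]
    apply List.ext_getElem (by simp [hlen])
    intro j hj _
    have hjn : j < bits.length := by omega
    have h := hinv j hjn
    rw [List.getD_eq_getElem?_getD, List.getElem?_eq_getElem hj] at h
    simp only [Option.getD_some] at h
    rw [h]
    unfold pvSlot
    rw [List.getElem_map, List.getElem_range, pvF_unfold bits j, ← pv_bxor_assoc]
    have e1 : (if 12 ≤ j ∧ j < k + 12 then pvF bits (j - 12) else 0)
        = (if 12 ≤ j then pvF bits (j - 12) else 0) := by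
      split_ifs <;> first | rfl | omega
    have e2 : (if 17 ≤ j ∧ j < k + 17 then pvF bits (j - 17) else 0)
        = (if 17 ≤ j then pvF bits (j - 17) else 0) := by
      split_ifs <;> first | rfl | omega
    rw [e1, e2]
  | succ m ih =>
    intro k out hm hlen hinv
    have hk : k < bits.length := by omega
    rw [show bits.length - k = m + 1 from hm, List.range'_succ, List.foldl_cons]
    obtain ⟨hlen', hinv'⟩ := pv_b_step bits out k hlen hk hinv
    have hih := ih (k + 1) (pvStep bits out k) (by omega) hlen' hinv'
    rw [show bits.length - (k + 1) = m from by omega] at hih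
    exact hih

lemma pvSlot_zero (bits : List Int) (j : Nat) : pvSlot bits 0 j = bits.getD j 0 := by
  unfold pvSlot
  rw [if_neg (by omega), if_neg (by omega), PySem.Int.bxor_zero, PySem.Int.bxor_zero]

-- ===== VERDICT (by name: the statement is the Claim_ definition above) =====
theorem descramble_spec : Claim_equal_descramble := by
  intro bits _
  show descramble bits = descramble_alt bits
  have ha : descramble bits = (List.range bits.length).map (pvF bits) := by
    have h := pv_a_main bits bits 0 rfl
    simpa [descramble, pvReg] using h
  have hb : descramble_alt bits = (List.range bits.length).map (pvF bits) := by
    have h := pv_b_inv bits (bits.length - 0) 0 bits rfl rfl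
      (fun j hj => (pvSlot_zero bits j).symm)
    have he : descramble_alt bits = (List.range bits.length).foldl (pvStep bits) bits := rfl
    rw [Nat.sub_zero] at h
    rw [he, List.range_eq_range', h, List.range_eq_range']
  rw [ha, hb]
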